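-- pv_equiv track=rewrite | github.com/burgerhex/histcord-clear-notifier | clear_types.py | is_repeated_and_numbered
-- ===== SOURCE A (Python) =====
-- def is_repeated_and_numbered(cell_value, pattern):
--     parts = cell_value.split(" ")
--     if len(parts) < 2:
--         return False
--     for i, part in enumerate(parts):
--         if part != f"{pattern}{i + 1}":
--             return False
--     return True
-- ===== SOURCE B (Python) =====
-- def is_repeated_and_numbered(cell_value, pattern):
--     # Greedy single-pass parser: consume "pattern1", " ", "pattern2", ... directly
--     # from the string, never splitting it. A pattern containing the delimiter can
--     # never occur inside a space-free token, so it can never match.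
--     if " " in pattern:
--         return False
--     i = 1
--     rest = cell_value
--     while True:
--         tok = pattern + str(i)
--         if not rest.startswith(tok):
--             return False
--         rest = rest[len(tok):]
--         if rest == "":
--             return i >= 2
--         if not rest.startswith(" "):
--             return False
--         rest = rest[1:]
--         i += 1
-- ===== Notes on version B (the rewrite author's own statement) =====
-- stated objective: alternative
-- what changed: B never splits the string: it is a greedy single-pass parser that consumes pattern+str(i), a space, pattern+str(i+1), ... directly from the front of cell_value (with a guard rejecting patterns containing the space delimiter, which can never match a space-free token), instead of A's split-then-check-each-part loop.
import Mathlib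
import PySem

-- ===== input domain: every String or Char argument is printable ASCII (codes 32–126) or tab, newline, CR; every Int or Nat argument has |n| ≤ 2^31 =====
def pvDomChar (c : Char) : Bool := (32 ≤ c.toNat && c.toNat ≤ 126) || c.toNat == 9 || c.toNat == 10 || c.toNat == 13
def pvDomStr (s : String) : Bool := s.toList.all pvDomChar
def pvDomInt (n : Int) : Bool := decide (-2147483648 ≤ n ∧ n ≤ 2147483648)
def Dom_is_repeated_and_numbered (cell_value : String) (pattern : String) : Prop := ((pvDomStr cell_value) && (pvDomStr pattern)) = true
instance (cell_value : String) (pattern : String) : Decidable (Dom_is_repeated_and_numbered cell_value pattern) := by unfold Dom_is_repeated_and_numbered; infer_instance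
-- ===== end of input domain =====

-- B replaces A's split-then-check-each-part loop by a greedy single-pass parser that consumes
-- "pattern1", " ", "pattern2", … directly from the front of the string (objective: alternative; same O(n) cost).

-- ===== PORT A =====
def pvLoopA (pat : List Char) : List (List Char) → Nat → Bool
  | [], _ => true
  | p :: rest, i =>
    if p ≠ pat ++ PySem.Int.toChars ((i : Int) + 1) then false
    else pvLoopA pat rest (i + 1)

def is_repeated_and_numbered (cell_value : String) (pattern : String) : Bool :=
  let parts := PySem.Chars.splitOn cell_value.toList [' ']
  if parts.length < 2 then false
  else pvLoopA pattern.toList parts 0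

-- ===== PORT B =====
-- the while-loop of Source B; fuel = |cell_value| + 1 strictly bounds the iteration count
-- (each iteration consumes at least two characters of `rest`)
def pvLoopB (pat : List Char) : Nat → List Char → Nat → Bool
  | 0, _, _ => false
  | fuel + 1, rest, i =>
    let tok := pat ++ PySem.Int.toChars (i : Int)
    if ¬ PySem.Chars.startswith rest tok then false
    else
      let rest1 := PySem.List.slice rest (some (tok.length : Int)) none
      if rest1 = [] then decide (2 ≤ i)
      else if ¬ PySem.Chars.startswith rest1 [' '] then false
      else pvLoopB pat fuel (PySem.List.slice rest1 (some 1) none) (i + 1)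

def is_repeated_and_numbered_alt (cell_value : String) (pattern : String) : Bool :=
  if PySem.Chars.isIn [' '] pattern.toList then false
  else pvLoopB pattern.toList (cell_value.toList.length + 1) cell_value.toList 1

-- ===== PRECONDITION & SPEC =====
def Spec_is_repeated_and_numbered (cell_value : String) (pattern : String) (out : Bool) : Prop := out = is_repeated_and_numbered_alt cell_value pattern
instance (cell_value : String) (pattern : String) (out : Bool) : Decidable (Spec_is_repeated_and_numbered cell_value pattern out) := by unfold Spec_is_repeated_and_numbered; infer_instance

-- ===== CLAIM (what is proved, stated in full; the proofs are below) =====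
def Claim_equal_is_repeated_and_numbered : Prop := ∀ (cell_value : String) (pattern : String), Dom_is_repeated_and_numbered cell_value pattern → Spec_is_repeated_and_numbered cell_value pattern (is_repeated_and_numbered cell_value pattern)

-- ===== LEMMAS AND PROOFS =====

-- splitc is a fuel-free reformulation of PySem.Chars.splitOn for a single-character separator,
-- used only in the proofs below.
def splitc (c : Char) : List Char → List (List Char)
  | [] => [[]]
  | x :: rest => if x = c then [] :: splitc c rest else (splitc c rest).modifyHead (x :: ·)

theorem splitc_ne_nil (c : Char) (s : List Char) : splitc c s ≠ [] := by
  induction s with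
  | nil => simp [splitc]
  | cons x rest ih =>
    simp only [splitc]
    split
    · simp
    · cases h : splitc c rest with
      | nil => exact absurd h ih
      | cons q qs => simp

theorem go_eq (c : Char) (fuel : Nat) (l cur : List Char) (acc : List (List Char))
    (h : l.length < fuel) :
    PySem.Chars.splitOn.go [c] fuel l cur acc
      = acc.reverse ++ (splitc c l).modifyHead (cur.reverse ++ ·) := by
  induction fuel generalizing l cur acc with
  | zero => omega
  | succ fuel ih =>
    cases l with
    | nil => simp [PySem.Chars.splitOn.go, splitc]
    | cons x rest =>
      rw [PySem.Chars.splitOn.go]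
      by_cases hx : x = c
      · subst hx
        simp only [List.isPrefixOf, BEq.rfl, Bool.true_and, if_pos]
        simp only [List.length_cons, List.length_nil, Nat.zero_add, List.drop_succ_cons, List.drop_zero]
        rw [ih rest [] (cur.reverse :: acc) (by simp at h; omega)]
        simp only [splitc, List.reverse_nil, List.nil_append,
          List.reverse_cons, List.append_assoc, List.singleton_append]
        cases splitc x rest <;> simp
      · have : [c].isPrefixOf (x :: rest) = false := by
          simp [List.isPrefixOf, Ne.symm hx]
        rw [this]
        simp only [Bool.false_eq_true, if_neg, not_false_iff]
        rw [ih rest (x :: cur) acc (by simp at h; omega)]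
        simp only [splitc, if_neg hx]
        cases hs : splitc c rest with
        | nil => exact absurd hs (splitc_ne_nil c rest)
        | cons q qs => simp

theorem splitOn_eq_splitc (c : Char) (s : List Char) :
    PySem.Chars.splitOn s [c] = splitc c s := by
  rw [PySem.Chars.splitOn, go_eq c (s.length+1) s [] [] (by omega)]
  cases h : splitc c s with
  | nil => exact absurd h (splitc_ne_nil c s)
  | cons q qs => simp

theorem join_cons_head (c x : Char) (q : List Char) (qs : List (List Char)) :
    PySem.Chars.join [c] ((x :: q) :: qs) = x :: PySem.Chars.join [c] (q :: qs) := by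
  cases qs with
  | nil => simp [PySem.Chars.join, List.intercalate]
  | cons r rs => rw [PySem.Chars.join_cons_cons, PySem.Chars.join_cons_cons]; simp

theorem join_splitc (c : Char) (s : List Char) :
    PySem.Chars.join [c] (splitc c s) = s := by
  induction s with
  | nil => simp [splitc, PySem.Chars.join_singleton]
  | cons x rest ih =>
    simp only [splitc]
    by_cases hx : x = c
    · subst hx
      rw [if_pos rfl]
      cases hs : splitc x rest with
      | nil => exact absurd hs (splitc_ne_nil x rest)
      | cons q qs =>
        rw [PySem.Chars.join_cons_cons]
        rw [hs] at ih; rw [ih]; simp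
    · rw [if_neg hx]
      cases hs : splitc c rest with
      | nil => exact absurd hs (splitc_ne_nil c rest)
      | cons q qs =>
        rw [List.modifyHead_cons, join_cons_head]
        rw [hs] at ih; rw [ih]

theorem splitc_of_notMem (c : Char) (t : List Char) (h : c ∉ t) : splitc c t = [t] := by
  induction t with
  | nil => simp [splitc]
  | cons x rest ih =>
    simp only [List.mem_cons, not_or] at h
    rw [splitc, if_neg (fun hxc => h.1 hxc.symm), ih h.2]
    rfl

theorem splitc_append (c : Char) (s t : List Char) :
    splitc c (s ++ c :: t) = splitc c s ++ splitc c t := by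
  induction s with
  | nil => simp [splitc]
  | cons x s' ih =>
    by_cases hx : x = c
    · subst hx; simp [List.cons_append, splitc, ih]
    · simp only [List.cons_append, splitc, if_neg hx, ih]
      cases hs : splitc c s' with
      | nil => exact absurd hs (splitc_ne_nil c s')
      | cons q qs => simp

theorem notMem_of_mem_splitc (c : Char) (s p : List Char) (hp : p ∈ splitc c s) : c ∉ p := by
  induction s generalizing p with
  | nil => simp [splitc] at hp; simp [hp]
  | cons x rest ih =>
    simp only [splitc] at hp
    by_cases hx : x = c
    · rw [if_pos hx] at hp
      rcases List.mem_cons.1 hp with rfl | hp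
      · simp
      · exact ih p hp
    · rw [if_neg hx] at hp
      cases hs : splitc c rest with
      | nil => exact absurd hs (splitc_ne_nil c rest)
      | cons q qs =>
        rw [hs] at hp
        rcases List.mem_cons.1 hp with rfl | hp
        · intro hmem
          rcases List.mem_cons.1 hmem with rfl | hmem
          · exact hx rfl
          · exact ih q (by rw [hs]; simp) hmem
        · exact ih p (by rw [hs]; simp [hp])

-- digits of str(i) for i ≥ 0 never contain a space
theorem digitChar_ne_space (m : Nat) (hm : m < 10) : Nat.digitChar m ≠ ' ' := by
  interval_cases m <;> decide

theorem toDigitsCore_no_space (fuel : Nat) : ∀ (n : Nat) (ds : List Char),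
    (∀ c ∈ ds, c ≠ ' ') → ∀ c ∈ Nat.toDigitsCore 10 fuel n ds, c ≠ ' ' := by
  induction fuel with
  | zero => intro n ds h; simpa [Nat.toDigitsCore] using h
  | succ fuel ih =>
    intro n ds h
    rw [Nat.toDigitsCore]
    have hd : ∀ c ∈ (n % 10).digitChar :: ds, c ≠ ' ' := by
      intro c hc
      rcases List.mem_cons.1 hc with rfl | hc
      · exact digitChar_ne_space _ (Nat.mod_lt _ (by omega))
      · exact h c hc
    split
    · exact hd
    · exact ih _ _ hd

theorem space_notMem_toChars (i : Nat) : ' ' ∉ PySem.Int.toChars (i : Int) := by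
  simp only [PySem.Int.toChars]
  rw [if_neg (by omega)]
  intro hmem
  exact toDigitsCore_no_space (Int.toNat i + 1) _ [] (by simp) ' ' hmem rfl

-- the token pattern+str(m) contains no space when pattern does not
theorem space_notMem_tok (pat : List Char) (hpat : ' ' ∉ pat) (m : Nat) :
    ' ' ∉ pat ++ PySem.Int.toChars (m : Int) := by
  intro h
  rcases List.mem_append.1 h with h | h
  · exact hpat h
  · exact space_notMem_toChars m h

-- the head of splitc c s is a prefix of s
theorem splitc_head_prefix (c : Char) (s q : List Char) (qs : List (List Char))
    (h : splitc c s = q :: qs) : q <+: s := by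
  have hj := join_splitc c s
  rw [h] at hj
  cases qs with
  | nil =>
    rw [PySem.Chars.join_singleton] at hj
    exact hj ▸ List.prefix_refl q
  | cons r rs =>
    rw [PySem.Chars.join_cons_cons] at hj
    exact ⟨[c] ++ PySem.Chars.join [c] (r :: rs), by simpa using hj⟩

-- shift of the canonical token list by one
theorem range_map_shift (n : Nat) (f : Nat → List Char) :
    (List.range (n + 1)).map f = f 0 :: (List.range n).map (fun j => f (j + 1)) := by
  rw [List.range_succ_eq_map, List.map_cons, List.map_map]
  rfl

-- characterisation of A's part-checking loop (parts are exactly the numbered tokens from i+1)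
theorem pvLoopA_iff (pat : List Char) (ps : List (List Char)) (i : Nat) :
    pvLoopA pat ps i = true ↔
      ps = (List.range ps.length).map (fun j => pat ++ PySem.Int.toChars (((i + j : Nat) : Int) + 1)) := by
  induction ps generalizing i with
  | nil => simp [pvLoopA]
  | cons p rest ih =>
    simp only [pvLoopA, List.length_cons, List.range_succ_eq_map, List.map_cons, List.map_map]
    by_cases hp : p = pat ++ PySem.Int.toChars ((i : Int) + 1)
    · rw [if_neg (by simpa using hp)]
      rw [ih (i + 1)]
      constructor
      · rintro h
        rw [List.cons_eq_cons]
        refine ⟨by simpa using hp, ?_⟩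
        rw [h]
        simp only [List.length_map, List.length_range]
        apply List.map_congr_left
        intro j hj
        simp only [Function.comp]
        congr 2
        omega
      · rintro h
        rw [List.cons_eq_cons] at h
        rw [h.2]
        simp only [List.length_map, List.length_range]
        apply List.map_congr_left
        intro j hj
        simp only [Function.comp]
        congr 2
        omega
    · rw [if_pos (by simpa using hp)]
      constructor
      · intro h; exact absurd h (by simp)
      · intro h
        rw [List.cons_eq_cons] at h
        exact absurd (hp (by simpa using h.1)) (by simp)

-- characterisation of B's greedy loop: it accepts iff the space-split of `rest`
-- is exactly the numbered tokens from i on, and the last number is at least 2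
theorem pvLoopB_iff (pat : List Char) (hpat : ' ' ∉ pat) :
    ∀ (fuel : Nat) (rest : List Char) (i : Nat), rest.length < fuel → 1 ≤ i →
    (pvLoopB pat fuel rest i = true ↔
      (splitc ' ' rest = (List.range (splitc ' ' rest).length).map
          (fun j => pat ++ PySem.Int.toChars ((i + j : Nat) : Int))
        ∧ 3 ≤ i + (splitc ' ' rest).length)) := by
  intro fuel
  induction fuel with
  | zero => intro rest i h; omega
  | succ fuel ih =>
    intro rest i hlen hi
    rw [pvLoopB]
    by_cases hpre : PySem.Chars.startswith rest (pat ++ PySem.Int.toChars (i : Int)) = true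
    · rw [if_neg (by simp [hpre])]
      obtain ⟨tail, htail⟩ : (pat ++ PySem.Int.toChars (i : Int)) <+: rest :=
        (PySem.Chars.startswith_iff _ _).1 hpre
      have hslice : PySem.List.slice rest (some ((pat ++ PySem.Int.toChars (i : Int)).length : Int)) none
          = tail := by
        rw [PySem.List.slice_from_natCast, ← htail, List.drop_left]
      rw [hslice]
      cases tail with
      | nil =>
        rw [if_pos rfl]
        -- rest = tok; splitc gives the single token
        have hrest : rest = pat ++ PySem.Int.toChars (i : Int) := by simp [← htail]
        have hsp : splitc ' ' rest = [pat ++ PySem.Int.toChars (i : Int)] := by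
          rw [hrest]; exact splitc_of_notMem _ _ (space_notMem_tok pat hpat i)
        rw [hsp]
        simp only [List.length_cons, List.length_nil]
        constructor
        · intro h
          refine ⟨by simp, by simp at h; omega⟩
        · rintro ⟨_, h2⟩
          simp only [decide_eq_true_eq]
          omega
      | cons c t' =>
        rw [if_neg (by simp)]
        by_cases hc : c = ' '
        · subst hc
          have hsw : PySem.Chars.startswith (' ' :: t') [' '] = true :=
            (PySem.Chars.startswith_iff _ _).2 ⟨t', rfl⟩
          rw [if_neg (by simp [hsw])]
          rw [PySem.List.slice_from_one]
          simp only [List.tail_cons]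
          have hrest : rest = (pat ++ PySem.Int.toChars (i : Int)) ++ ' ' :: t' := htail.symm
          have hsp : splitc ' ' rest = (pat ++ PySem.Int.toChars (i : Int)) :: splitc ' ' t' := by
            rw [hrest, splitc_append, splitc_of_notMem _ _ (space_notMem_tok pat hpat i)]
            simp
          rw [ih t' (i + 1) (by rw [hrest] at hlen; simp at hlen; omega) (by omega), hsp]
          simp only [List.length_cons]
          rw [range_map_shift]
          constructor
          · rintro ⟨h1, h2⟩
            constructor
            · rw [List.cons_eq_cons]
              refine ⟨by simp, ?_⟩
              rw [h1]
              simp only [List.length_map, List.length_range]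
              apply List.map_congr_left
              intro j hj
              congr 2
              omega
            · omega
          · rintro ⟨h1, h2⟩
            rw [List.cons_eq_cons] at h1
            constructor
            · rw [h1.2]
              simp only [List.length_map, List.length_range]
              apply List.map_congr_left
              intro j hj
              congr 2
              omega
            · omega
        · have hsw : PySem.Chars.startswith (c :: t') [' '] = false := by
            rw [← Bool.not_eq_true, PySem.Chars.startswith_iff]
            rintro ⟨u, hu⟩
            simp only [List.singleton_append, List.cons_eq_cons] at hu
            exact hc hu.1.symm
          rw [if_pos (by simp [hsw])]
          -- token followed by a non-space, non-empty remainder: split head is strictly longer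
          simp only [Bool.false_eq_true, false_iff, not_and]
          intro h1
          exfalso
          have hrest : rest = (pat ++ PySem.Int.toChars (i : Int)) ++ c :: t' := htail.symm
          cases hs : splitc ' ' rest with
          | nil => exact absurd hs (splitc_ne_nil ' ' rest)
          | cons q qs =>
            rw [hs] at h1
            have hq : q = pat ++ PySem.Int.toChars ((i : Nat) : Int) := by
              rw [List.length_cons, range_map_shift] at h1
              simpa using (List.cons_eq_cons.1 h1).1
            have hj := join_splitc ' ' rest
            rw [hs] at hj
            cases qs with
            | nil =>
              rw [PySem.Chars.join_singleton, hq, hrest] at hj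
              simp at hj
            | cons r rs =>
              rw [PySem.Chars.join_cons_cons, hq, hrest] at hj
              simp only [List.append_assoc, List.append_cancel_left_eq,
                List.singleton_append, List.cons_eq_cons] at hj
              exact hc hj.1.symm
    · rw [if_pos (by simpa using hpre)]
      simp only [Bool.false_eq_true, false_iff, not_and]
      intro h1
      exfalso
      cases hs : splitc ' ' rest with
      | nil => exact absurd hs (splitc_ne_nil ' ' rest)
      | cons q qs =>
        rw [hs] at h1
        have hq : q = pat ++ PySem.Int.toChars ((i : Nat) : Int) := by
          rw [List.length_cons, range_map_shift] at h1
          simpa using (List.cons_eq_cons.1 h1).1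
        have hqpre : q <+: rest := splitc_head_prefix ' ' rest q qs hs
        rw [hq] at hqpre
        exact hpre ((PySem.Chars.startswith_iff _ _).2 hqpre)

theorem main_eq (cell_value pattern : String) :
    is_repeated_and_numbered cell_value pattern = is_repeated_and_numbered_alt cell_value pattern := by
  unfold is_repeated_and_numbered is_repeated_and_numbered_alt
  simp only [splitOn_eq_splitc]
  by_cases hsp : ' ' ∈ pattern.toList
  · -- pattern contains the delimiter: both sides are false
    have hIn : PySem.Chars.isIn [' '] pattern.toList = true := by
      rw [PySem.Chars.isIn_iff_infix]; exact (List.singleton_infix_iff _ _).2 hsp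
    conv_rhs => rw [if_pos hIn]
    split
    · rfl
    · rename_i hlen
      rw [← Bool.not_eq_true, pvLoopA_iff]
      intro h1
      cases hs : splitc ' ' cell_value.toList with
      | nil => exact absurd hs (splitc_ne_nil ' ' cell_value.toList)
      | cons q qs =>
        rw [hs] at h1
        have hq : q = pattern.toList ++ PySem.Int.toChars (((0 : Nat) : Int) + 1) := by
          rw [List.length_cons, range_map_shift] at h1
          simpa using (List.cons_eq_cons.1 h1).1
        have hnosp : ' ' ∉ q := notMem_of_mem_splitc ' ' cell_value.toList q (by rw [hs]; simp)
        exact hnosp (hq ▸ List.mem_append.2 (Or.inl hsp))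
  · have hIn : ¬ PySem.Chars.isIn [' '] pattern.toList = true := by
      rw [PySem.Chars.isIn_iff_infix, List.singleton_infix_iff]; exact hsp
    conv_rhs => rw [if_neg hIn]
    rw [Bool.eq_iff_iff,
      pvLoopB_iff pattern.toList hsp (cell_value.toList.length + 1) cell_value.toList 1
        (by omega) (by omega)]
    have hmap : (List.range (splitc ' ' cell_value.toList).length).map
          (fun j => pattern.toList ++ PySem.Int.toChars (((0 + j : Nat) : Int) + 1))
        = (List.range (splitc ' ' cell_value.toList).length).map
          (fun j => pattern.toList ++ PySem.Int.toChars ((1 + j : Nat) : Int)) := by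
      apply List.map_congr_left
      intro j _
      congr 1
      push_cast
      ring
    split
    · rename_i hlen
      simp only [Bool.false_eq_true, false_iff, not_and]
      intro _
      omega
    · rename_i hlen
      rw [pvLoopA_iff]
      simp only [Nat.zero_add] at hmap ⊢
      rw [hmap]
      constructor
      · intro h
        exact ⟨h, by omega⟩
      · rintro ⟨h, _⟩
        exact h

-- ===== VERDICT (by name: the statement is the Claim_ definition above) =====
theorem is_repeated_and_numbered_spec : Claim_equal_is_repeated_and_numbered := by
  intro cell_value pattern _
  unfold Spec_is_repeated_and_numbered
  exact main_eq cell_value pattern
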